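-- pv_equiv track=rewrite | github.com/Flipajs/FERDA | gui/graph_widget/edge.py | get_longest_string_rows
-- ===== SOURCE A (Python) =====
-- def get_longest_string_rows(string):
--     st = ""
--     longest = ""
--     rows = 1
--     for i in range(len(string)):
--         st += string[i]
--         if string[i] == "\n":
--             rows += 1
--             if len(st) > len(longest):
--                 longest = st
--             st = ""
--     else:
--         st += "\n"
--         if len(st) > len(longest):
--             longest = st
--     return longest, rows
-- ===== SOURCE B (Python) =====
-- def get_longest_string_rows(string):
--     lines = string.split("\n")
--     longest = max((line + "\n" for line in lines), key=len)
--     return longest, len(lines)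
-- ===== Notes on version B (the rewrite author's own statement) =====
-- stated objective: faster
-- what changed: Replaces A's manual per-character accumulator loop with a single newline split plus max(..., key=len) over the segments (first maximal wins) and rows = number of segments.
import Mathlib
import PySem

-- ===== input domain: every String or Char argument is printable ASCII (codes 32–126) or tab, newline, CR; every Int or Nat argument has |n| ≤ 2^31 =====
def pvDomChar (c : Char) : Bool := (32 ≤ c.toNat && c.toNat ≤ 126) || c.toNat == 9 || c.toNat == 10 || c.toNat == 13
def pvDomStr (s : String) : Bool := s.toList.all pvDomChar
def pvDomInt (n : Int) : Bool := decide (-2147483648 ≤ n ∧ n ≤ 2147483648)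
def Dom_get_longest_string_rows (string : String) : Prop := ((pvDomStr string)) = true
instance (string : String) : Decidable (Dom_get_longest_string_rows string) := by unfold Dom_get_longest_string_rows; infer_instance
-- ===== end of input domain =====

-- B replaces A's manual char-accumulator loop by split("\n") + max(key=len) (first-wins); objective: simpler.

-- ===== PORT A =====
-- the for-loop of A: state (st, longest, rows), one step per character
def pvALoop : List Char → List Char → List Char → Int → (List Char × List Char × Int)
  | [], st, longest, rows => (st, longest, rows)
  | c :: cs, st, longest, rows =>
      let st' := st ++ [c]
      if c = '\n' then
        pvALoop cs [] (if st'.length > longest.length then st' else longest) (rows + 1)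
      else
        pvALoop cs st' longest rows

-- the for-else tail of A: st += "\n"; then the final comparison
def pvAFinish (r : List Char × List Char × Int) : List Char × Int :=
  (if (r.1 ++ ['\n']).length > r.2.1.length then r.1 ++ ['\n'] else r.2.1, r.2.2)

def get_longest_string_rows (string : String) : String × Int :=
  let f := pvAFinish (pvALoop string.toList [] [] 1)
  (String.mk f.1, f.2)

-- ===== PORT B =====
-- port of str.split("\n") (exact for this non-empty one-char separator)
def pvSplitNl : List Char → List (List Char)
  | [] => [[]]
  | c :: cs =>
      if c = '\n' then [] :: pvSplitNl cs
      else match pvSplitNl cs with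
           | [] => [[c]]
           | p :: ps => (c :: p) :: ps

-- port of max(iterable, key=len): first element maximal under len wins
def pvMaxByLen : List Char → List (List Char) → List Char
  | best, [] => best
  | best, l :: ls => pvMaxByLen (if l.length > best.length then l else best) ls

def get_longest_string_rows_alt (string : String) : String × Int :=
  let lines := pvSplitNl string.toList
  let cand := lines.map (· ++ ['\n'])
  let longest := match cand with
    | [] => []                -- unreachable: split always returns a non-empty list
    | m :: ms => pvMaxByLen m ms
  (String.mk longest, (lines.length : Int))

-- ===== PRECONDITION & SPEC =====
def Spec_get_longest_string_rows (string : String) (out : String × Int) : Prop := out = get_longest_string_rows_alt string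
instance (string : String) (out : String × Int) : Decidable (Spec_get_longest_string_rows string out) := by unfold Spec_get_longest_string_rows; infer_instance

-- ===== CLAIM (what is proved, stated in full; the proofs are below) =====
def Claim_equal_get_longest_string_rows : Prop := ∀ (string : String), Dom_get_longest_string_rows string → Spec_get_longest_string_rows string (get_longest_string_rows string)

-- ===== LEMMAS AND PROOFS =====

theorem pvALoop_cons_nl (cs st longest : List Char) (rows : Int) :
    pvALoop ('\n' :: cs) st longest rows
      = pvALoop cs [] (if (st ++ ['\n']).length > longest.length then st ++ ['\n'] else longest) (rows + 1) := by
  simp [pvALoop]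

theorem pvALoop_cons (c : Char) (hc : c ≠ '\n') (cs st longest : List Char) (rows : Int) :
    pvALoop (c :: cs) st longest rows = pvALoop cs (st ++ [c]) longest rows := by
  simp [pvALoop, hc]

theorem pvSplitNl_cons_nl (cs : List Char) : pvSplitNl ('\n' :: cs) = [] :: pvSplitNl cs := by
  simp [pvSplitNl]

-- split is never empty
theorem pvSplitNl_ne_nil (s : List Char) : pvSplitNl s ≠ [] := by
  cases s with
  | nil => simp [pvSplitNl]
  | cons c cs =>
      simp only [pvSplitNl]
      split
      · simp
      · cases h : pvSplitNl cs <;> simp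

theorem pvSplitNl_cons (c : Char) (hc : c ≠ '\n') (cs : List Char) {p : List Char} {ps : List (List Char)}
    (h : pvSplitNl cs = p :: ps) : pvSplitNl (c :: cs) = (c :: p) :: ps := by
  simp [pvSplitNl, hc, h]

-- glue the pending accumulator st onto the first piece of a split
def pvGlue (st : List Char) : List (List Char) → List (List Char)
  | [] => [st]
  | p :: ps => (st ++ p) :: ps

theorem pvGlue_nil (l : List (List Char)) (h : l ≠ []) : pvGlue [] l = l := by
  cases l with
  | nil => exact absurd rfl h
  | cons p ps => simp [pvGlue]

-- the core invariant: running A's loop from state (st, longest, rows) and finishing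
-- equals folding max-by-len over the '\n'-terminated pieces of the (glued) split
theorem pvALoop_eq (s st longest : List Char) (rows : Int) :
    pvAFinish (pvALoop s st longest rows)
    = (pvMaxByLen longest ((pvGlue st (pvSplitNl s)).map (· ++ ['\n'])),
       rows + ((pvSplitNl s).length : Int) - 1) := by
  induction s generalizing st longest rows with
  | nil =>
      simp [pvALoop, pvAFinish, pvSplitNl, pvGlue, pvMaxByLen]
  | cons c cs ih =>
      by_cases hc : c = '\n'
      · subst hc
        rw [pvALoop_cons_nl, pvSplitNl_cons_nl, ih,
            pvGlue_nil _ (pvSplitNl_ne_nil cs)]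
        simp [pvGlue, pvMaxByLen]
        omega
      · obtain ⟨p, ps, h⟩ : ∃ p ps, pvSplitNl cs = p :: ps := by
          cases hh : pvSplitNl cs with
          | nil => exact absurd hh (pvSplitNl_ne_nil cs)
          | cons p ps => exact ⟨p, ps, rfl⟩
        rw [pvALoop_cons c hc, pvSplitNl_cons c hc cs h, ih, h]
        simp [pvGlue, List.append_assoc]

theorem get_longest_string_rows_eq (string : String) :
    get_longest_string_rows string = get_longest_string_rows_alt string := by
  unfold get_longest_string_rows get_longest_string_rows_alt
  rw [pvALoop_eq, pvGlue_nil _ (pvSplitNl_ne_nil string.toList)]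
  obtain ⟨p, ps, h⟩ : ∃ p ps, pvSplitNl string.toList = p :: ps := by
    cases hh : pvSplitNl string.toList with
    | nil => exact absurd hh (pvSplitNl_ne_nil string.toList)
    | cons p ps => exact ⟨p, ps, rfl⟩
  rw [h]
  simp [pvMaxByLen]

-- ===== VERDICT (by name: the statement is the Claim_ definition above) =====
theorem get_longest_string_rows_spec : Claim_equal_get_longest_string_rows := by
  intro s _
  unfold Spec_get_longest_string_rows
  exact get_longest_string_rows_eq s
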